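-- pv_equiv track=rewrite | github.com/ShabalalaWATP/vra | backend/app/analysis/structure.py | _find_python_block_end
-- ===== SOURCE A (Python) =====
-- def _find_python_block_end(lines: list[str], start_line: int, indent: int) -> int:
--     """Find the last line in a Python indented block."""
--     end_line = start_line
--     for idx in range(start_line, len(lines)):
--         raw_line = lines[idx]
--         stripped = raw_line.strip()
--         if not stripped:
--             continue
--
--         current_indent = len(raw_line) - len(raw_line.lstrip(" \t"))
--         if current_indent <= indent and not stripped.startswith("#"):
--             break
--         end_line = idx + 1
--
--     return end_line
-- ===== SOURCE B (Python) =====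
-- def _find_python_block_end(lines: list[str], start_line: int, indent: int) -> int:
--     """Find the last line in a Python indented block (locate boundary, then trim trailing blanks)."""
--     n = len(lines)
--     # forward scan: first line that closes the block (non-blank, shallow enough, not a comment)
--     boundary = n
--     for idx in range(start_line, n):
--         raw_line = lines[idx]
--         stripped = raw_line.strip()
--         if stripped and len(raw_line) - len(raw_line.lstrip(" \t")) <= indent and not stripped.startswith("#"):
--             boundary = idx
--             break
--     # backward scan: last non-blank line inside [start_line, boundary)
--     for idx in range(boundary - 1, start_line - 1, -1):
--         if lines[idx].strip():
--             return idx + 1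
--     return start_line
-- ===== Notes on version B (the rewrite author's own statement) =====
-- stated objective: alternative
-- what changed: Replaces A's single forward pass that accumulates end_line with a locate-then-trim decomposition: a forward scan finds the first block-closing line (the boundary), then a backward scan over [start_line, boundary) returns idx+1 of the last non-blank line, defaulting to start_line.
import Mathlib
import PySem

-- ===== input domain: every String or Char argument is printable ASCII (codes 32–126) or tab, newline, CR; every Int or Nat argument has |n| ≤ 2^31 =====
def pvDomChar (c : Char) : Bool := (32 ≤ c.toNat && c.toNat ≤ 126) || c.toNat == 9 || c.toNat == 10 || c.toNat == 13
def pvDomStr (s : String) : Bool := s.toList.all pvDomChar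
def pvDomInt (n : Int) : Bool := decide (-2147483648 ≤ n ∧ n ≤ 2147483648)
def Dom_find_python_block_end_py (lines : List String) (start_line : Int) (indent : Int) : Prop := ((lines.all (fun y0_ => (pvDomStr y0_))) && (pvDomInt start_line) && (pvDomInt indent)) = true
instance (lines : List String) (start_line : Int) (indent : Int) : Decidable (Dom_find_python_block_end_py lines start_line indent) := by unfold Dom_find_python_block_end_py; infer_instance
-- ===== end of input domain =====

-- B finds the block end by a locate-boundary-then-trim-backward decomposition instead of A's
-- single accumulating forward pass (objective: alternative; same asymptotic cost).


-- hand port of `len(raw) - len(raw.lstrip(" \t"))` (exact: lstrip(" \t") drops exactly the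
-- leading ' '/'\t' characters, so the difference is the length of that leading run)
def pvIndentOf (raw : String) : Int :=
  (PySem.Str.len raw : Int) - ((raw.toList.dropWhile (fun c => c = ' ' || c = '\t')).length : Int)

-- ===== PORT A =====
-- A's single forward loop over range(start_line, len(lines)), carrying end_line; fuel = number
-- of remaining indices; lines[idx] via pyGet? with getD "" (the none case is outside Pre_).
def pvLoopA (lines : List String) (indent : Int) : Nat → Int → Int → Int
  | 0, _, end_line => end_line
  | fuel + 1, idx, end_line =>
    let raw := (PySem.List.pyGet? lines idx).getD ""
    let stripped := PySem.Str.strip raw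
    if stripped = "" then pvLoopA lines indent fuel (idx + 1) end_line
    else if pvIndentOf raw ≤ indent ∧ PySem.Str.startswith stripped "#" = false then end_line
    else pvLoopA lines indent fuel (idx + 1) (idx + 1)

def find_python_block_end_py (lines : List String) (start_line : Int) (indent : Int) : Int :=
  pvLoopA lines indent ((lines.length : Int) - start_line).toNat start_line start_line

-- ===== PORT B =====
-- forward scan: first index whose line closes the block, else len(lines)
def pvBoundary (lines : List String) (indent : Int) : Nat → Int → Int
  | 0, _ => (lines.length : Int)
  | fuel + 1, idx =>
    let raw := (PySem.List.pyGet? lines idx).getD ""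
    let stripped := PySem.Str.strip raw
    if stripped ≠ "" ∧ pvIndentOf raw ≤ indent ∧ PySem.Str.startswith stripped "#" = false then idx
    else pvBoundary lines indent fuel (idx + 1)

-- backward scan from `idx` downward: first non-blank line gives idx+1, else the default
def pvTrimBack (lines : List String) : Nat → Int → Int → Int
  | 0, _, dflt => dflt
  | fuel + 1, idx, dflt =>
    if PySem.Str.strip ((PySem.List.pyGet? lines idx).getD "") ≠ "" then idx + 1
    else pvTrimBack lines fuel (idx - 1) dflt

def find_python_block_end_py_alt (lines : List String) (start_line : Int) (indent : Int) : Int :=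
  let b := pvBoundary lines indent ((lines.length : Int) - start_line).toNat start_line
  pvTrimBack lines (b - start_line).toNat (b - 1) start_line

-- ===== PRECONDITION & SPEC =====
-- Pre_ excludes exactly the inputs where the Python A raises IndexError:
-- start_line < -len(lines) makes lines[start_line] an out-of-range negative index.
def Pre_find_python_block_end_py (lines : List String) (start_line : Int) (indent : Int) : Prop :=
  -(lines.length : Int) ≤ start_line
instance (lines : List String) (start_line : Int) (indent : Int) : Decidable (Pre_find_python_block_end_py lines start_line indent) := by unfold Pre_find_python_block_end_py; infer_instance

def pvWitness_find_python_block_end_py : List String × Int × Int := (["def f():", "    x = 1", "", "    # c", "y = 2"], 1, 0)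

def Spec_find_python_block_end_py (lines : List String) (start_line : Int) (indent : Int) (out : Int) : Prop := out = find_python_block_end_py_alt lines start_line indent
instance (lines : List String) (start_line : Int) (indent : Int) (out : Int) : Decidable (Spec_find_python_block_end_py lines start_line indent out) := by unfold Spec_find_python_block_end_py; infer_instance

-- ===== CLAIM (what is proved, stated in full; the proofs are below) =====
def Claim_equal_find_python_block_end_py : Prop := ∀ (lines : List String) (start_line : Int) (indent : Int), Dom_find_python_block_end_py lines start_line indent → Pre_find_python_block_end_py lines start_line indent → Spec_find_python_block_end_py lines start_line indent (find_python_block_end_py lines start_line indent)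

-- ===== LEMMAS AND PROOFS =====

-- blank at the bottom of the scanned range: one extra fuel step changes nothing
lemma trimBack_bottom_blank (lines : List String) :
    ∀ (n : Nat) (j dflt : Int),
      PySem.Str.strip ((PySem.List.pyGet? lines (j - n)).getD "") = "" →
      pvTrimBack lines (n + 1) j dflt = pvTrimBack lines n j dflt := by
  intro n
  induction n with
  | zero =>
    intro j dflt h
    simp only [Nat.cast_zero, sub_zero] at h
    simp [pvTrimBack, h]
  | succ m ih =>
    intro j dflt h
    by_cases hj : PySem.Str.strip ((PySem.List.pyGet? lines j).getD "") = ""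
    · have : pvTrimBack lines (m + 1 + 1) j dflt = pvTrimBack lines (m + 1) (j - 1) dflt := by
        simp [pvTrimBack, hj]
      rw [this, ih (j - 1) dflt (by rw [show (j - 1) - (m : Int) = j - ((m : Nat) + 1 : Nat) by push_cast; ring]; exact h)]
      simp [pvTrimBack, hj]
    · simp [pvTrimBack, hj]

-- non-blank at the bottom: one extra fuel step is the same as defaulting to bottom+1
lemma trimBack_bottom_nonblank (lines : List String) :
    ∀ (n : Nat) (j dflt : Int),
      PySem.Str.strip ((PySem.List.pyGet? lines (j - n)).getD "") ≠ "" →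
      pvTrimBack lines (n + 1) j dflt = pvTrimBack lines n j (j - n + 1) := by
  intro n
  induction n with
  | zero =>
    intro j dflt h
    simp only [Nat.cast_zero, sub_zero] at h
    simp [pvTrimBack, h]
  | succ m ih =>
    intro j dflt h
    by_cases hj : PySem.Str.strip ((PySem.List.pyGet? lines j).getD "") = ""
    · have h' : PySem.Str.strip ((PySem.List.pyGet? lines ((j - 1) - (m : Int))).getD "") ≠ "" := by
        rw [show (j - 1) - (m : Int) = j - ((m : Nat) + 1 : Nat) by push_cast; ring]; exact h
      have : pvTrimBack lines (m + 1 + 1) j dflt = pvTrimBack lines (m + 1) (j - 1) dflt := by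
        simp [pvTrimBack, hj]
      rw [this, ih (j - 1) dflt h']
      have : pvTrimBack lines (m + 1) j (j - ((m : Nat) + 1 : Nat) + 1) =
          pvTrimBack lines m (j - 1) (j - ((m : Nat) + 1 : Nat) + 1) := by
        simp [pvTrimBack, hj]
      rw [this]
      congr 1 <;> push_cast <;> ring
    · simp [pvTrimBack, hj]

-- the boundary never lies below the index the scan starts at
lemma boundary_ge (lines : List String) (indent : Int) :
    ∀ (fuel : Nat) (idx : Int), fuel = ((lines.length : Int) - idx).toNat → idx ≤ lines.length →
      idx ≤ pvBoundary lines indent fuel idx := by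
  intro fuel
  induction fuel with
  | zero => intro idx _ h2; simpa [pvBoundary] using h2
  | succ f ih =>
    intro idx h1 h2
    have hlt : idx < (lines.length : Int) := by omega
    have hf : f = ((lines.length : Int) - (idx + 1)).toNat := by omega
    by_cases hc : PySem.Str.strip ((PySem.List.pyGet? lines idx).getD "") ≠ "" ∧
        pvIndentOf ((PySem.List.pyGet? lines idx).getD "") ≤ indent ∧
        PySem.Str.startswith (PySem.Str.strip ((PySem.List.pyGet? lines idx).getD "")) "#" = false
    · simp only [pvBoundary]; rw [if_pos hc]
    · have : pvBoundary lines indent (f + 1) idx = pvBoundary lines indent f (idx + 1) := by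
        simp only [pvBoundary]; rw [if_neg hc]
      rw [this]
      have := ih (idx + 1) hf (by omega)
      omega

-- main invariant: A's forward accumulating loop equals "find boundary, then trim backward"
lemma loopA_eq (lines : List String) (indent : Int) :
    ∀ (fuel : Nat) (idx e : Int), fuel = ((lines.length : Int) - idx).toNat →
      pvLoopA lines indent fuel idx e =
        pvTrimBack lines (pvBoundary lines indent fuel idx - idx).toNat
          (pvBoundary lines indent fuel idx - 1) e := by
  intro fuel
  induction fuel with
  | zero =>
    intro idx e h
    have : ((lines.length : Int) - idx).toNat = 0 := h.symm
    have hle : (lines.length : Int) ≤ idx := by omega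
    simp only [pvLoopA, pvBoundary]
    rw [show ((lines.length : Int) - idx).toNat = 0 by omega]
    simp [pvTrimBack]
  | succ f ih =>
    intro idx e h
    have hlt : idx < (lines.length : Int) := by omega
    have hf : f = ((lines.length : Int) - (idx + 1)).toNat := by omega
    set raw := (PySem.List.pyGet? lines idx).getD "" with hraw
    by_cases hb : PySem.Str.strip raw = ""
    · -- blank line: both sides skip it
      have hcond : ¬ (PySem.Str.strip raw ≠ "" ∧ pvIndentOf raw ≤ indent ∧
          PySem.Str.startswith (PySem.Str.strip raw) "#" = false) := by
        intro hc; exact hc.1 hb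
      have hA : pvLoopA lines indent (f + 1) idx e = pvLoopA lines indent f (idx + 1) e := by
        simp only [pvLoopA]; rw [if_pos hb]
      have hB : pvBoundary lines indent (f + 1) idx = pvBoundary lines indent f (idx + 1) := by
        simp only [pvBoundary]; rw [if_neg hcond]
      rw [hA, hB, ih (idx + 1) e hf]
      set b := pvBoundary lines indent f (idx + 1) with hbdef
      have hgeb : idx + 1 ≤ b := boundary_ge lines indent f (idx + 1) hf (by omega)
      have hsplit : (b - idx).toNat = (b - (idx + 1)).toNat + 1 := by omega
      rw [hsplit, trimBack_bottom_blank lines ((b - (idx + 1)).toNat) (b - 1) e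
        (by rw [show (b - 1) - ((b - (idx + 1)).toNat : Int) = idx by omega]; exact hb)]
    · by_cases hk : pvIndentOf raw ≤ indent ∧ PySem.Str.startswith (PySem.Str.strip raw) "#" = false
      · -- closing line: A breaks with e; B's boundary is idx, so the trim range is empty
        have hA : pvLoopA lines indent (f + 1) idx e = e := by
          simp only [pvLoopA]; rw [if_neg hb, if_pos hk]
        have hB : pvBoundary lines indent (f + 1) idx = idx := by
          simp only [pvBoundary]; rw [if_pos ⟨hb, hk⟩]
        rw [hA, hB]
        simp [pvTrimBack]
      · -- body line: A advances end_line to idx+1; B's trim stops at idx from below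
        have hcond : ¬ (PySem.Str.strip raw ≠ "" ∧ pvIndentOf raw ≤ indent ∧
            PySem.Str.startswith (PySem.Str.strip raw) "#" = false) := by
          intro hc; exact hk hc.2
        have hA : pvLoopA lines indent (f + 1) idx e = pvLoopA lines indent f (idx + 1) (idx + 1) := by
          simp only [pvLoopA]; rw [if_neg hb, if_neg hk]
        have hB : pvBoundary lines indent (f + 1) idx = pvBoundary lines indent f (idx + 1) := by
          simp only [pvBoundary]; rw [if_neg hcond]
        rw [hA, hB, ih (idx + 1) (idx + 1) hf]
        set b := pvBoundary lines indent f (idx + 1) with hbdef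
        have hgeb : idx + 1 ≤ b := boundary_ge lines indent f (idx + 1) hf (by omega)
        have hsplit : (b - idx).toNat = (b - (idx + 1)).toNat + 1 := by omega
        rw [hsplit, trimBack_bottom_nonblank lines ((b - (idx + 1)).toNat) (b - 1) e
          (by rw [show (b - 1) - ((b - (idx + 1)).toNat : Int) = idx by omega]; exact hb)]
        congr 1
        omega

-- ===== VERDICT (by name: the statement is the Claim_ definition above) =====
theorem find_python_block_end_py_spec : Claim_equal_find_python_block_end_py := by
  intro lines start_line indent _ _
  unfold Spec_find_python_block_end_py find_python_block_end_py find_python_block_end_py_alt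
  exact loopA_eq lines indent _ start_line start_line rfl
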